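-- pv_equiv track=rewrite | github.com/TStalnaker44/Hopfield-Network | hopfield.py | arrayToImage
-- ===== SOURCE A (Python) =====
-- def arrayToImage(array, width):
--     string = ""
--     count = 1
--     for element in array:
--         string += str(element)
--         if count%width == 0 and count != len(array):
--             string += "\n"
--         count += 1
--     return string.replace("0"," ").replace("1","*")
-- ===== SOURCE B (Python) =====
-- def arrayToImage(array, width):
--     rows = [array[i:i+width] for i in range(0, len(array), width)]
--     text = "\n".join("".join(str(e) for e in row) for row in rows)
--     return text.replace("0", " ").replace("1", "*")
-- ===== Notes on version B (the rewrite author's own statement) =====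
-- stated objective: simpler
-- what changed: Replaces the counter-with-modular-newline-guard loop by slicing the array into rows of width, joining each row and joining rows with newlines, applying the substitutions once; Pre_ restricts to positive widths (the natural domain of a row width): at width=0 A raises ZeroDivisionError on non-empty input, and for negative widths A's newline placement via Python's negative modulo is an implementation accident.
-- outside the precondition, e.g. on arrayToImage([], 0): A returns '', B raises ValueError; on arrayToImage([1, 2], -2): A returns '*2', B returns ''; on arrayToImage([1, 2], 0): A raises ZeroDivisionError, B raises ValueError
import Mathlib
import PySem

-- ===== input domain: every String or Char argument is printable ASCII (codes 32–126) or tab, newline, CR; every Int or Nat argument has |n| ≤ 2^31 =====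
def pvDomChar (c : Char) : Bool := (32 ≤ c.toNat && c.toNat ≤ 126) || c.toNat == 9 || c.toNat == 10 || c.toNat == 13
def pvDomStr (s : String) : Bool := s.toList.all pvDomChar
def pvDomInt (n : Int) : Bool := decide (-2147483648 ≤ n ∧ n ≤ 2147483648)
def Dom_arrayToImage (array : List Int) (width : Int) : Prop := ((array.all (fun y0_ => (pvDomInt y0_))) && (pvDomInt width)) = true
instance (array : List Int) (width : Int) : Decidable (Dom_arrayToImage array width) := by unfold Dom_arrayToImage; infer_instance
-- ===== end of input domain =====

-- B builds the image by slicing the array into rows of `width` and joining them, instead of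
-- A's counter-with-modular-guard loop; equal return values proved for positive widths (simpler, not faster).

-- ===== PORT A =====
def arrayToImage (array : List Int) (width : Int) : String :=
  let res := array.foldl
    (fun (st : String × Int) element =>
      let s := st.1 ++ PySem.Int.toStr element
      let s := if PySem.Int.mod st.2 width = 0 ∧ st.2 ≠ (array.length : Int) then s ++ "\n" else s
      (s, st.2 + 1))
    ("", 1)
  PySem.Str.replace (PySem.Str.replace res.1 "0" " ") "1" "*"

-- ===== PORT B =====
def arrayToImage_alt (array : List Int) (width : Int) : String :=
  let rows := (PySem.List.pyRange 0 (array.length : Int) width).map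
    (fun i => PySem.List.slice array (some i) (some (i + width)))
  let text := PySem.Str.join "\n" (rows.map (fun row => PySem.Str.join "" (row.map PySem.Int.toStr)))
  PySem.Str.replace (PySem.Str.replace text "0" " ") "1" "*"

-- ===== PRECONDITION & SPEC =====
-- Pre_ restricts to positive widths, the natural domain of a row width: at width = 0 A raises
-- ZeroDivisionError on non-empty input (B's range raises ValueError even on empty input), and for
-- negative widths A's newline placement by divisibility under Python's negative modulo is an
-- accident of A's implementation, on which B's natural row slicing instead returns ''.
def Pre_arrayToImage (array : List Int) (width : Int) : Prop := 1 ≤ width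
instance (array : List Int) (width : Int) : Decidable (Pre_arrayToImage array width) := by
  unfold Pre_arrayToImage; infer_instance

def pvWitness_arrayToImage : List Int × Int := ([1, 0, 2, 10], 2)

def Spec_arrayToImage (array : List Int) (width : Int) (out : String) : Prop := out = arrayToImage_alt array width
instance (array : List Int) (width : Int) (out : String) : Decidable (Spec_arrayToImage array width out) := by unfold Spec_arrayToImage; infer_instance

-- ===== CLAIM (what is proved, stated in full; the proofs are below) =====
def Claim_equal_arrayToImage : Prop := ∀ (array : List Int) (width : Int), Dom_arrayToImage array width → Pre_arrayToImage array width → Spec_arrayToImage array width (arrayToImage array width)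

-- ===== LEMMAS AND PROOFS =====

-- A's loop body, as characters: count c, total n, divisor width.
def pvBuildA (n width : Int) (c : Int) : List Int → List Char
  | [] => []
  | x :: xs =>
    PySem.Int.toChars x ++
      (if PySem.Int.mod c width = 0 ∧ c ≠ n then ['\n'] else []) ++
      pvBuildA n width (c + 1) xs

-- rows of size w (matches take w / drop w for 1 ≤ w)
def pvChunks (w : Nat) : List Int → List (List Int)
  | [] => []
  | x :: xs => (x :: xs.take (w - 1)) :: pvChunks w (xs.drop (w - 1))
  termination_by xs => xs.length
  decreasing_by simp [List.length_drop]

def pvRowChars (row : List Int) : List Char :=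
  PySem.Chars.join [] (row.map PySem.Int.toChars)

theorem pvRowChars_cons (x : Int) (xs : List Int) :
    pvRowChars (x :: xs) = PySem.Int.toChars x ++ pvRowChars xs := by
  cases xs with
  | nil => simp [pvRowChars, PySem.Chars.join_singleton, PySem.Chars.join_nil]
  | cons y ys => simp [pvRowChars, PySem.Chars.join_cons_cons]

-- the fold of port A builds pvBuildA
theorem pvFoldA (n width : Int) (xs : List Int) : ∀ (s : String) (c : Int),
    ((xs.foldl (fun (st : String × Int) element =>
      let s := st.1 ++ PySem.Int.toStr element
      let s := if PySem.Int.mod st.2 width = 0 ∧ st.2 ≠ n then s ++ "\n" else s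
      (s, st.2 + 1)) (s, c)).1).toList = s.toList ++ pvBuildA n width c xs := by
  induction xs with
  | nil => intro s c; simp [pvBuildA]
  | cons x xs ih =>
    intro s c
    simp only [List.foldl_cons]
    rw [ih]
    by_cases h : PySem.Int.mod c width = 0 ∧ c ≠ n
    · simp [pvBuildA, if_pos h, PySem.Int.toList_toStr]
    · simp [pvBuildA, if_neg h, PySem.Int.toList_toStr]

theorem pvBuildA_append (n width : Int) (ys zs : List Int) : ∀ c : Int,
    pvBuildA n width c (ys ++ zs) =
      pvBuildA n width c ys ++ pvBuildA n width (c + (ys.length : Int)) zs := by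
  induction ys with
  | nil => intro c; simp [pvBuildA]
  | cons y ys ih =>
    intro c
    have hc : c + 1 + (ys.length : Int) = c + ((y :: ys).length : Int) := by push_cast [List.length_cons]; ring
    simp only [List.cons_append, pvBuildA, ih (c + 1), hc, List.append_assoc]

-- a row whose interior indices never trigger the newline condition
theorem pvBuildA_row (n width : Int) (xs : List Int) : ∀ c : Int, xs ≠ [] →
    (∀ i : Int, c ≤ i → i < c + (xs.length : Int) - 1 → ¬(PySem.Int.mod i width = 0 ∧ i ≠ n)) →
    pvBuildA n width c xs = pvRowChars xs ++
      (if PySem.Int.mod (c + (xs.length : Int) - 1) width = 0 ∧ (c + (xs.length : Int) - 1) ≠ n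
       then ['\n'] else []) := by
  induction xs with
  | nil => intro c h; exact absurd rfl h
  | cons x xs ih =>
    intro c _ hno
    cases xs with
    | nil =>
      have h1 : c + ((([x] : List Int)).length : Int) - 1 = c := by push_cast [List.length_cons, List.length_nil]; ring
      rw [h1]
      simp [pvBuildA, pvRowChars_cons, pvRowChars, PySem.Chars.join_nil]
    | cons y ys =>
      have hlen : (2 : Int) ≤ ((x :: y :: ys).length : Int) := by
        push_cast [List.length_cons]; omega
      have h0 : ¬(PySem.Int.mod c width = 0 ∧ c ≠ n) :=
        hno c le_rfl (by omega)
      have hx : c + 1 + ((y :: ys).length : Int) - 1 = c + ((x :: y :: ys).length : Int) - 1 := by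
        push_cast [List.length_cons]; ring
      rw [show pvBuildA n width c (x :: y :: ys) =
            PySem.Int.toChars x ++
              (if PySem.Int.mod c width = 0 ∧ c ≠ n then ['\n'] else []) ++
              pvBuildA n width (c + 1) (y :: ys) from rfl]
      rw [if_neg h0,
          ih (c + 1) (by simp) (fun i hi1 hi2 => hno i (by omega) (by rw [← hx] at *; omega)),
          hx, pvRowChars_cons]
      simp [pvRowChars_cons, List.append_assoc]

theorem pvChunks_eq (w : Nat) (hw : 1 ≤ w) (xs : List Int) (h : xs ≠ []) :
    pvChunks w xs = xs.take w :: pvChunks w (xs.drop w) := by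
  cases xs with
  | nil => exact absurd rfl h
  | cons x t =>
    obtain ⟨w', rfl⟩ : ∃ w', w = w' + 1 := ⟨w - 1, by omega⟩
    simp [pvChunks, List.take_succ_cons, List.drop_succ_cons]

theorem pvBuildA_chunks (width : Int) (w : Nat) (hw : 1 ≤ w) (hww : (w : Int) = |width|) :
    ∀ m (xs : List Int), xs.length = m → ∀ (p : Nat) (n : Int),
      n = (p : Int) + (xs.length : Int) → (w : Int) ∣ (p : Int) →
      pvBuildA n width ((p : Int) + 1) xs =
        PySem.Chars.join ['\n'] ((pvChunks w xs).map pvRowChars) := by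
  have hmod : ∀ i : Int, PySem.Int.mod i width = 0 ↔ (w : Int) ∣ i := by
    intro i
    rw [PySem.Int.mod_eq_zero_iff_dvd, ← Int.natAbs_dvd, ← Int.abs_eq_natAbs, ← hww]
  intro m
  induction m using Nat.strong_induction_on with
  | _ m ih =>
    intro xs hlen p n hn hp
    cases xs with
    | nil => simp [pvBuildA, pvChunks, PySem.Chars.join_nil]
    | cons x t =>
      have hxs : (x :: t) ≠ [] := by simp
      set xs := x :: t with hxsdef
      have hlpos : 1 ≤ xs.length := by simp [hxsdef]
      have hnod : ∀ j : Int, 0 < j → j < (w : Int) → ¬ ((w : Int) ∣ ((p : Int) + j)) := by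
        intro j hj1 hj2 hdvd
        have : (w : Int) ∣ j := (dvd_add_right hp).mp hdvd
        have := Int.le_of_dvd hj1 this
        omega
      by_cases hz : xs.length ≤ w
      · -- a single (last) row
        have hrow := pvBuildA_row n width xs ((p : Int) + 1) hxs (by
          intro i hi1 hi2
          rintro ⟨hm, -⟩
          exact hnod (i - (p : Int)) (by omega) (by omega)
            (by rwa [show (p : Int) + (i - (p : Int)) = i by ring, ← hmod i]))
        have hlast : (p : Int) + 1 + (xs.length : Int) - 1 = n := by omega
        rw [hrow, hlast, if_neg (by rintro ⟨-, hne⟩; exact hne rfl)]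
        have hch : pvChunks w xs = [xs] := by
          rw [pvChunks_eq w hw xs hxs, List.take_of_length_le hz,
              List.drop_eq_nil_of_le hz]
          simp [pvChunks]
        simp [hch, PySem.Chars.join_singleton]
      · -- first row of exactly w elements, then recurse
        have hlt : w < xs.length := by omega
        have hys : (xs.take w).length = w := by simp [List.length_take]; omega
        have hzs : xs.drop w ≠ [] := by
          simp [List.drop_eq_nil_iff]; omega
        conv_lhs => rw [← List.take_append_drop w xs]
        rw [pvBuildA_append, hys]
        have hrow := pvBuildA_row n width (xs.take w) ((p : Int) + 1)
          (by intro h; rw [h] at hys; simp at hys; omega)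
          (by
            intro i hi1 hi2
            rintro ⟨hm, -⟩
            rw [hys] at hi2
            exact hnod (i - (p : Int)) (by omega) (by omega)
              (by rwa [show (p : Int) + (i - (p : Int)) = i by ring, ← hmod i]))
        rw [hys] at hrow
        have hlast : (p : Int) + 1 + (w : Int) - 1 = (p : Int) + (w : Int) := by ring
        rw [hrow, hlast, if_pos ⟨by rw [hmod]; exact dvd_add hp dvd_rfl, by omega⟩]
        have harg : (p : Int) + 1 + (w : Int) = ((p + w : Nat) : Int) + 1 := by push_cast; ring
        rw [harg, ih (xs.length - w) (by omega) (xs.drop w) (by simp) (p + w) n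
              (by push_cast; simp [List.length_drop]; omega) (by push_cast; exact dvd_add hp dvd_rfl)]
        rw [pvChunks_eq w hw xs hxs, List.map_cons]
        rw [pvChunks_eq w hw (xs.drop w) hzs, List.map_cons]
        rw [PySem.Chars.join_cons_cons]

theorem pvPyRange_cons (a b s : Int) (hs : 0 < s) (hab : a < b) :
    PySem.List.pyRange a b s = a :: PySem.List.pyRange (a + s) b s := by
  rw [PySem.List.pyRange_of_pos _ _ hs, PySem.List.pyRange_of_pos _ _ hs, if_pos hab]
  by_cases h : a + s < b
  · rw [if_pos h]
    have hN : ((b - a + s - 1) / s).toNat = ((b - (a + s) + s - 1) / s).toNat + 1 := by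
      have h1 : b - a + s - 1 = (b - (a + s) + s - 1) + 1 * s := by ring
      have h2 : (0 : Int) ≤ (b - (a + s) + s - 1) / s := Int.ediv_nonneg (by omega) (by omega)
      rw [h1, Int.add_mul_ediv_right _ _ (by omega : s ≠ 0)]
      omega
    rw [hN, List.range_succ_eq_map, List.map_cons, List.map_map]
    refine List.cons_eq_cons.mpr ⟨by simp, ?_⟩
    apply List.map_congr_left
    intro k _
    simp only [Function.comp_apply]
    push_cast
    ring
  · rw [if_neg h]
    have hN : ((b - a + s - 1) / s).toNat = 1 := by
      have h1 : b - a + s - 1 = (b - a - 1) + 1 * s := by ring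
      have h2 : (b - a - 1) / s = 0 := Int.ediv_eq_zero_of_lt (by omega) (by omega)
      rw [h1, Int.add_mul_ediv_right _ _ (by omega : s ≠ 0), h2]
      omega
    rw [hN]
    simp

theorem pvRows_chunks (array : List Int) (w : Nat) (hw : 1 ≤ w) :
    ∀ m (j : Nat), array.length - j = m →
      (PySem.List.pyRange (j : Int) ((array.length : Nat) : Int) (w : Int)).map
        (fun i => PySem.List.slice array (some i) (some (i + (w : Int)))) =
      pvChunks w (array.drop j) := by
  intro m
  induction m using Nat.strong_induction_on with
  | _ m ih =>
    intro j hj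
    by_cases hlt : j < array.length
    · rw [pvPyRange_cons _ _ _ (by exact_mod_cast hw) (by exact_mod_cast hlt), List.map_cons,
          PySem.List.slice_natCast_add,
          show (j : Int) + (w : Int) = ((j + w : Nat) : Int) by push_cast; ring,
          ih (array.length - (j + w)) (by omega) (j + w) rfl,
          pvChunks_eq w hw (array.drop j) (by simp [List.drop_eq_nil_iff]; omega),
          List.drop_drop]
    · have h1 : PySem.List.pyRange (j : Int) ((array.length : Nat) : Int) (w : Int) = [] := by
        rw [PySem.List.pyRange_of_pos _ _ (by exact_mod_cast hw),
            if_neg (by exact_mod_cast hlt)]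
        simp
      have h2 : array.drop j = [] := List.drop_eq_nil_of_le (by omega)
      simp [h1, h2, pvChunks]

-- ===== VERDICT (by name: the statement is the Claim_ definition above) =====
theorem arrayToImage_spec : Claim_equal_arrayToImage := by
  unfold Claim_equal_arrayToImage
  intro array width _ hpre
  unfold Spec_arrayToImage
  have hpre : 1 ≤ width := hpre
  have hw : 1 ≤ width.toNat := by omega
  have hww : ((width.toNat : Nat) : Int) = |width| := by
    rw [Int.toNat_of_nonneg (by omega), abs_of_nonneg (by omega)]
  have hwc : ((width.toNat : Nat) : Int) = width := by omega
  simp only [arrayToImage, arrayToImage_alt]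
  congr 2
  apply String.toList_inj.mp
  rw [pvFoldA ((array.length : Nat) : Int) width array "" 1]
  rw [show ((1 : Int) = ((0 : Nat) : Int) + 1) by simp]
  rw [pvBuildA_chunks width width.toNat hw hww array.length array rfl 0
        ((array.length : Nat) : Int) (by simp) (by simp)]
  rw [PySem.Str.toList_join, List.map_map]
  rw [show width = ((width.toNat : Nat) : Int) from hwc.symm]
  rw [show ((0 : Int) = ((0 : Nat) : Int)) by simp]
  rw [pvRows_chunks array width.toNat hw array.length 0 (by simp)]
  simp only [List.drop_zero]
  have hcomp : (String.toList ∘ fun row : List Int =>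
      PySem.Str.join "" (row.map PySem.Int.toStr)) = pvRowChars := by
    funext row
    simp only [Function.comp_apply, PySem.Str.toList_join, List.map_map, pvRowChars]
    congr 1
    apply List.map_congr_left
    intro z _
    exact PySem.Int.toList_toStr z
  rw [hcomp]
  simp
  rw [show max width 0 = width by omega]
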